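-- pv_equiv track=rewrite | github.com/aldanalina/steganography | 1/steganography_ascii.py | case_hide
-- ===== SOURCE A (Python) =====
-- def text_to_binary(text):
--     """Мәтінді екілік кодқа айналдыру"""
--     return ''.join(format(ord(c), '08b') for c in text)
--
-- def case_hide(cover_text, secret_message):
--     """Әріп регистрі арқылы жасыру"""
--     binary = text_to_binary(secret_message)
--     result = list(cover_text)
--     bit_index = 0
--
--     # Барлық әріптерді табу
--     letters_found = []
--     for i, char in enumerate(result):
--         if char.isalpha():
--             letters_found.append(i)
--
--     # Егер әріптер жетпейтін болса, мәтінді кеңейту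
--     if len(binary) > len(letters_found):
--         multiplier = (len(binary) // len(letters_found)) + 1 if letters_found else 1
--         extended_text = cover_text * multiplier
--         result = list(extended_text)
--         letters_found = [i for i, char in enumerate(result) if char.isalpha()]
--
--     # Биттерді енгізу
--     for bit_index, letter_pos in enumerate(letters_found):
--         if bit_index < len(binary):
--             char = result[letter_pos]
--             if binary[bit_index] == '1':
--                 result[letter_pos] = char.upper()
--             else:
--                 result[letter_pos] = char.lower()
--
--     return ''.join(result)
-- ===== SOURCE B (Python) =====
-- def case_hide(cover_text, secret_message):
--     # Message-driven embedding: no bit string is ever built. Each message char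
--     # consumes the next 8 letters of the cover and cases them by its code's bits.
--     nbits = 8 * len(secret_message)
--     n_letters = sum(1 for c in cover_text if c.isalpha())
--     text = cover_text
--     if nbits > n_letters:
--         text = cover_text * ((nbits // n_letters) + 1 if n_letters else 1)
--     chars = list(text)
--     i = 0
--     for mc in secret_message:
--         code = ord(mc)
--         bitpos = 7
--         while i < len(chars) and bitpos >= 0:
--             ch = chars[i]
--             if ch.isalpha():
--                 chars[i] = ch.upper() if (code >> bitpos) & 1 else ch.lower()
--                 bitpos -= 1
--             i += 1
--     return ''.join(chars)
-- ===== Notes on version B (the rewrite author's own statement) =====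
-- stated objective: alternative
-- what changed: B never builds the binary bit string or A's letter-position index list: it computes the needed bit count as 8*len(message) arithmetically and embeds message-driven, each message character casing the next 8 cover letters directly from its code's bits via shifts, advancing one shared position cursor over the char list.
import Mathlib
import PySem

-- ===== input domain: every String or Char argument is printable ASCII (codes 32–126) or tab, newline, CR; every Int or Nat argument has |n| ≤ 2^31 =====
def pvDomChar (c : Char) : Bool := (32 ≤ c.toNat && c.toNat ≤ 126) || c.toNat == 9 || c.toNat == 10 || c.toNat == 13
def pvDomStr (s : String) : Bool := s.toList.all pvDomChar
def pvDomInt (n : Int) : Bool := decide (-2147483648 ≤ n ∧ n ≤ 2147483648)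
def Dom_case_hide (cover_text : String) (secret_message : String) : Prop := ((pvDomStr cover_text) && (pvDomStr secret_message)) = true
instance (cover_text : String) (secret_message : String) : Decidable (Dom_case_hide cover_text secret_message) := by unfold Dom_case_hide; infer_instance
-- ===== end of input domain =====

-- B is message-driven: it never builds the bit string — each message char consumes the next
-- 8 cover letters and cases them by its code's bits, splitting off the processed prefix.

-- ===== PORT A =====
-- format(ord(c), '08b') joined over the message (exact for ASCII, ord < 128)
def pvBit (n k : Nat) : Char := if n / 2 ^ k % 2 = 1 then '1' else '0'
def pvToBin8 (c : Char) : List Char :=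
  [pvBit c.toNat 7, pvBit c.toNat 6, pvBit c.toNat 5, pvBit c.toNat 4,
   pvBit c.toNat 3, pvBit c.toNat 2, pvBit c.toNat 1, pvBit c.toNat 0]
def pvBinary (s : String) : List Char := s.toList.flatMap pvToBin8

-- the 'for i, char in enumerate(result): if char.isalpha(): letters_found.append(i)' loop
def pvLetters : List Char → Nat → List Nat
  | [], _ => []
  | c :: cs, i => if PySem.Chars.isalpha c then i :: pvLetters cs (i + 1) else pvLetters cs (i + 1)

-- the 'for bit_index, letter_pos in enumerate(letters_found): …' loop (index accesses are in
-- range by construction; getD/set are exact there)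
def pvEmbed (binary : List Char) : List Char → List Nat → Nat → List Char
  | res, [], _ => res
  | res, p :: ps, k =>
    let res' :=
      if k < binary.length then
        if binary.getD k ' ' = '1' then res.set p (PySem.Chars.upperChar (res.getD p ' '))
        else res.set p (PySem.Chars.lowerChar (res.getD p ' '))
      else res
    pvEmbed binary res' ps (k + 1)

def case_hide (cover_text : String) (secret_message : String) : String :=
  let binary := pvBinary secret_message
  let result := cover_text.toList
  let letters := pvLetters result 0
  if binary.length > letters.length then
    let multiplier := if letters ≠ [] then binary.length / letters.length + 1 else 1
    let extended := (List.replicate multiplier cover_text.toList).flatten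
    String.mk (pvEmbed binary extended (pvLetters extended 0) 0)
  else
    String.mk (pvEmbed binary result letters 0)

-- ===== PORT B =====
-- the 'while i < len(chars) and bitpos >= 0: …' loop: r = bitpos + 1 bits still to place;
-- chars[i] read/write is in range under the guard, so getD/set are exact
def pvInner (code : Nat) (chars : List Char) (i : Nat) (r : Nat) : List Char × Nat :=
  if h : i < chars.length ∧ 0 < r then
    let ch := chars.getD i ' '
    if PySem.Chars.isalpha ch then
      pvInner code
        (chars.set i (if (code >>> (r - 1)) &&& 1 = 1 then PySem.Chars.upperChar ch
                      else PySem.Chars.lowerChar ch)) (i + 1) (r - 1)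
    else pvInner code chars (i + 1) r
  else (chars, i)
termination_by chars.length - i
decreasing_by
  · simp only [List.length_set]; omega
  · omega

def case_hide_alt (cover_text : String) (secret_message : String) : String :=
  let nbits := 8 * secret_message.toList.length
  let nLetters := cover_text.toList.countP (fun c => PySem.Chars.isalpha c)
  let text : List Char :=
    if nbits > nLetters then
      let multiplier := if nLetters ≠ 0 then nbits / nLetters + 1 else 1
      (List.replicate multiplier cover_text.toList).flatten
    else cover_text.toList
  -- the 'for mc in secret_message: …' loop over the shared state (chars, i)
  let p := secret_message.toList.foldl
    (fun (st : List Char × Nat) mc => pvInner mc.toNat st.1 st.2 8) (text, 0)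
  String.mk p.1

-- ===== PRECONDITION & SPEC =====
def Spec_case_hide (cover_text : String) (secret_message : String) (out : String) : Prop := out = case_hide_alt cover_text secret_message
instance (cover_text : String) (secret_message : String) (out : String) : Decidable (Spec_case_hide cover_text secret_message out) := by unfold Spec_case_hide; infer_instance

-- ===== CLAIM (what is proved, stated in full; the proofs are below) =====
def Claim_equal_case_hide : Prop := ∀ (cover_text : String) (secret_message : String), Dom_case_hide cover_text secret_message → Spec_case_hide cover_text secret_message (case_hide cover_text secret_message)

-- ===== LEMMAS AND PROOFS =====

-- proof-only bridge: A's position-indexed embedding seen as one left-to-right pass with a bit cursor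
def pvGoB (binary : List Char) : List Char → Nat → List Char
  | [], _ => []
  | c :: cs, k =>
    if PySem.Chars.isalpha c && k < binary.length then
      (if binary.getD k ' ' = '1' then PySem.Chars.upperChar c else PySem.Chars.lowerChar c)
        :: pvGoB binary cs (k + 1)
    else c :: pvGoB binary cs k

-- proof-only: pvInner on the suffix chars[i:], as a splitting function
def pvPlace (code : Nat) : List Char → Nat → List Char × List Char
  | cs, 0 => ([], cs)
  | [], _ + 1 => ([], [])
  | c :: cs, r + 1 =>
    if PySem.Chars.isalpha c then
      let p := pvPlace code cs r
      ((if (code >>> r) &&& 1 = 1 then PySem.Chars.upperChar c else PySem.Chars.lowerChar c)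
        :: p.1, p.2)
    else
      let p := pvPlace code cs (r + 1)
      (c :: p.1, p.2)

-- proof-only: the last r bits of pvToBin8 as a list
def pvBits (code : Nat) : Nat → List Char
  | 0 => []
  | r + 1 => pvBit code r :: pvBits code r

-- proof-only: B's message loop as structural recursion, flattened
def pvEmbFlat : List Char → List Char → List Char
  | rest, [] => rest
  | rest, m :: ms =>
    let q := pvPlace m.toNat rest 8
    q.1 ++ pvEmbFlat q.2 ms

theorem pvLetters_length (cs : List Char) : ∀ i, (pvLetters cs i).length = cs.countP (fun c => PySem.Chars.isalpha c) := by
  induction cs with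
  | nil => intro i; simp [pvLetters]
  | cons c cs ih =>
    intro i
    simp only [pvLetters, List.countP_cons]
    by_cases h : PySem.Chars.isalpha c <;> simp [h, ih]

theorem pvBinary_length (s : String) : (pvBinary s).length = 8 * s.toList.length := by
  unfold pvBinary
  induction s.toList with
  | nil => simp
  | cons c cs ih => simp [pvToBin8, ih]; ring

theorem set_append_len (pre cs : List Char) (c v : Char) :
    (pre ++ c :: cs).set pre.length v = pre ++ v :: cs := by
  induction pre with
  | nil => simp
  | cons p pre ih => simp [ih]

theorem getD_append_len (pre cs : List Char) (c d : Char) :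
    (pre ++ c :: cs).getD pre.length d = c := by
  induction pre with
  | nil => simp
  | cons p pre ih => simpa [List.getD] using ih

theorem pvEmbed_noop (binary : List Char) (ps : List Nat) :
    ∀ res k, binary.length ≤ k → pvEmbed binary res ps k = res := by
  induction ps with
  | nil => intro res k _; rfl
  | cons p ps ih =>
    intro res k hk
    have h1 : ¬ k < binary.length := by omega
    simp only [pvEmbed, h1, if_false]
    exact ih res (k + 1) (by omega)

theorem pvGoB_noop (binary : List Char) (cs : List Char) :
    ∀ k, binary.length ≤ k → pvGoB binary cs k = cs := by
  induction cs with
  | nil => intro k _; rfl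
  | cons c cs ih =>
    intro k hk
    have h1 : ¬ k < binary.length := by omega
    simp [pvGoB, h1, ih k hk]

theorem pvEmbed_eq_goB (binary : List Char) (cs : List Char) :
    ∀ (pre : List Char) (k : Nat),
      pvEmbed binary (pre ++ cs) (pvLetters cs pre.length) k = pre ++ pvGoB binary cs k := by
  induction cs with
  | nil => intro pre k; simp [pvLetters, pvEmbed, pvGoB]
  | cons c cs ih =>
    intro pre k
    by_cases ha : PySem.Chars.isalpha c
    · simp only [pvLetters]
      rw [if_pos ha]
      have hgu : ∀ hk : k < binary.length, pvGoB binary (c :: cs) k =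
          (if binary.getD k ' ' = '1' then PySem.Chars.upperChar c else PySem.Chars.lowerChar c)
            :: pvGoB binary cs (k + 1) := by
        intro hk
        simp only [pvGoB]
        rw [if_pos (by simp [ha, hk])]
      by_cases hk : k < binary.length
      · simp only [pvEmbed]
        rw [if_pos hk, getD_append_len, hgu hk]
        by_cases hb : binary.getD k ' ' = '1'
        · rw [if_pos hb, if_pos hb, set_append_len]
          have := ih (pre ++ [PySem.Chars.upperChar c]) (k + 1)
          simp only [List.length_append, List.length_cons, List.length_nil, Nat.zero_add,
            List.append_assoc, List.singleton_append] at this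
          rw [this]
        · rw [if_neg hb, if_neg hb, set_append_len]
          have := ih (pre ++ [PySem.Chars.lowerChar c]) (k + 1)
          simp only [List.length_append, List.length_cons, List.length_nil, Nat.zero_add,
            List.append_assoc, List.singleton_append] at this
          rw [this]
      · simp only [pvEmbed]
        rw [if_neg hk, pvEmbed_noop binary _ _ (k + 1) (by omega)]
        have hg : pvGoB binary (c :: cs) k = c :: pvGoB binary cs k := by
          simp only [pvGoB]
          rw [if_neg (by simp [hk])]
        rw [hg, pvGoB_noop binary cs k (by omega)]
    · simp only [pvLetters]
      rw [if_neg ha]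
      have := ih (pre ++ [c]) k
      simp only [List.length_append, List.length_cons, List.length_nil, Nat.zero_add,
        List.append_assoc, List.singleton_append] at this
      rw [this]
      have hg : pvGoB binary (c :: cs) k = c :: pvGoB binary cs k := by
        simp only [pvGoB]
        rw [if_neg (by simp [ha])]
      rw [hg]

theorem pvBits_length (code : Nat) : ∀ r, (pvBits code r).length = r := by
  intro r; induction r with
  | zero => rfl
  | succ r ih => simp [pvBits, ih]

theorem pvGoB_shift (P T : List Char) (cs : List Char) :
    ∀ j, pvGoB (P ++ T) cs (P.length + j) = pvGoB T cs j := by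
  induction cs with
  | nil => intro j; rfl
  | cons c cs ih =>
    intro j
    simp only [pvGoB, List.length_append]
    have hlt : (decide (P.length + j < P.length + T.length) : Bool) = decide (j < T.length) := by
      by_cases h : j < T.length <;> simp [h] <;> omega
    have hget : (P ++ T).getD (P.length + j) ' ' = T.getD j ' ' := by
      simp [List.getD_eq_getElem?_getD, List.getElem?_append_right]
    rw [hlt, hget]
    by_cases hc : PySem.Chars.isalpha c && decide (j < T.length)
    · rw [if_pos hc, if_pos hc]
      have := ih (j + 1)
      rw [← Nat.add_assoc] at this
      rw [this]
    · rw [if_neg hc, if_neg hc, ih j]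

theorem pvBit_one (code r : Nat) : (pvBit code r = '1') ↔ ((code >>> r) &&& 1 = 1) := by
  rw [Nat.and_one_is_mod, Nat.shiftRight_eq_div_pow]
  unfold pvBit
  by_cases h : code / 2 ^ r % 2 = 1 <;> simp [h]

theorem pvPlace_goB (code : Nat) : ∀ (cs : List Char) (r : Nat) (T : List Char),
    pvGoB (pvBits code r ++ T) cs 0 =
      (pvPlace code cs r).1 ++ pvGoB T (pvPlace code cs r).2 0 := by
  intro cs
  induction cs with
  | nil =>
    intro r T
    cases r <;> simp [pvPlace, pvGoB]
  | cons c cs ih =>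
    intro r T
    cases r with
    | zero => simp [pvPlace, pvBits]
    | succ r =>
      by_cases ha : PySem.Chars.isalpha c
      · simp only [pvGoB, pvPlace, ha]
        rw [if_pos (by simp [ha, pvBits_length])]
        have hget : (pvBits code (r + 1) ++ T).getD 0 ' ' = pvBit code r := by
          simp [pvBits]
        have hshift : pvGoB (pvBits code (r + 1) ++ T) cs 1 = pvGoB (pvBits code r ++ T) cs 0 := by
          have := pvGoB_shift [pvBit code r] (pvBits code r ++ T) cs 0
          simpa [pvBits] using this
        rw [hget, hshift, ih r T]
        by_cases hb : (code >>> r) &&& 1 = 1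
        · rw [if_pos ((pvBit_one code r).mpr hb), if_pos hb]; simp
        · rw [if_neg (fun h => hb ((pvBit_one code r).mp h)), if_neg hb]; simp
      · simp only [pvGoB, pvPlace, ha]
        rw [if_neg (by simp [ha])]
        rw [ih (r + 1) T]
        simp [pvPlace, ha]

theorem pvToBin8_eq_bits (c : Char) : pvToBin8 c = pvBits c.toNat 8 := by
  simp [pvToBin8, pvBits]

theorem pvEmbFlat_eq_goB : ∀ (ms : List Char) (cs : List Char),
    pvEmbFlat cs ms = pvGoB (ms.flatMap pvToBin8) cs 0 := by
  intro ms
  induction ms with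
  | nil => intro cs; simp [pvEmbFlat, pvGoB_noop]
  | cons m ms ih =>
    intro cs
    simp only [pvEmbFlat, List.flatMap_cons, pvToBin8_eq_bits]
    rw [pvPlace_goB m.toNat cs 8 (ms.flatMap pvToBin8), ih]

theorem pvInner_eq (code : Nat) : ∀ (cs pre : List Char) (r : Nat),
    pvInner code (pre ++ cs) pre.length r =
      (pre ++ (pvPlace code cs r).1 ++ (pvPlace code cs r).2,
       pre.length + (pvPlace code cs r).1.length) := by
  intro cs
  induction cs with
  | nil =>
    intro pre r
    rw [pvInner]
    rw [dif_neg (by simp)]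
    cases r <;> simp [pvPlace]
  | cons c cs ih =>
    intro pre r
    cases r with
    | zero =>
      rw [pvInner]
      rw [dif_neg (by omega)]
      simp [pvPlace]
    | succ r =>
      rw [pvInner]
      rw [dif_pos (by constructor <;> simp <;> omega)]
      simp only [getD_append_len, Nat.add_sub_cancel]
      by_cases ha : PySem.Chars.isalpha c
      · rw [if_pos ha, set_append_len]
        by_cases hb : (code >>> r) &&& 1 = 1
        · rw [if_pos hb]
          have := ih (pre ++ [PySem.Chars.upperChar c]) r
          simp only [List.length_append, List.length_cons, List.length_nil, Nat.zero_add,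
            List.append_assoc, List.singleton_append] at this
          rw [this]
          simp [pvPlace, ha, hb]
          omega
        · rw [if_neg hb]
          have hb' : ¬ code >>> r % 2 = 1 := by rwa [Nat.and_one_is_mod] at hb
          have := ih (pre ++ [PySem.Chars.lowerChar c]) r
          simp only [List.length_append, List.length_cons, List.length_nil, Nat.zero_add,
            List.append_assoc, List.singleton_append] at this
          rw [this]
          simp [pvPlace, ha, hb']
          omega
      · rw [if_neg ha]
        have := ih (pre ++ [c]) (r + 1)
        simp only [List.length_append, List.length_cons, List.length_nil, Nat.zero_add,
          List.append_assoc, List.singleton_append] at this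
        rw [this]
        simp [pvPlace, ha]
        omega

theorem foldIdx_eq : ∀ (ms : List Char) (pre cs : List Char),
    (ms.foldl (fun (st : List Char × Nat) mc => pvInner mc.toNat st.1 st.2 8)
        (pre ++ cs, pre.length)).1 = pre ++ pvEmbFlat cs ms := by
  intro ms
  induction ms with
  | nil => intro pre cs; simp [pvEmbFlat]
  | cons m ms ih =>
    intro pre cs
    simp only [List.foldl_cons, pvInner_eq]
    have h1 : pre ++ (pvPlace m.toNat cs 8).1 ++ (pvPlace m.toNat cs 8).2 =
        (pre ++ (pvPlace m.toNat cs 8).1) ++ (pvPlace m.toNat cs 8).2 := by simp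
    have h2 : pre.length + (pvPlace m.toNat cs 8).1.length =
        (pre ++ (pvPlace m.toNat cs 8).1).length := by simp
    rw [h1, h2, ih]
    simp [pvEmbFlat]

-- ===== VERDICT (by name: the statement is the Claim_ definition above) =====
theorem case_hide_spec : Claim_equal_case_hide := by
  intro ct sm _
  unfold Spec_case_hide case_hide case_hide_alt
  have hlen := pvLetters_length ct.toList 0
  have hbl : (pvBinary sm).length = 8 * sm.toList.length := pvBinary_length sm
  have hne : (pvLetters ct.toList 0 ≠ []) ↔
      (ct.toList.countP (fun c => PySem.Chars.isalpha c) ≠ 0) := by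
    rw [← hlen]
    simp [List.length_eq_zero_iff]
  have key : ∀ xs : List Char,
      pvEmbed (pvBinary sm) xs (pvLetters xs 0) 0 =
        (sm.toList.foldl (fun (st : List Char × Nat) mc =>
            pvInner mc.toNat st.1 st.2 8) (xs, 0)).1 := by
    intro xs
    have := foldIdx_eq sm.toList [] xs
    simp only [List.nil_append, List.length_nil] at this
    rw [this, pvEmbFlat_eq_goB]
    simpa [pvBinary] using pvEmbed_eq_goB (pvBinary sm) xs [] 0
  simp only []
  by_cases hc : (pvBinary sm).length > (pvLetters ct.toList 0).length
  · rw [if_pos hc, if_pos (show 8 * sm.toList.length >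
        ct.toList.countP (fun c => PySem.Chars.isalpha c) by rw [← hbl, ← hlen]; exact hc)]
    by_cases hz : pvLetters ct.toList 0 ≠ []
    · rw [if_pos hz, if_pos (hne.mp hz), hlen, hbl, key]
    · rw [if_neg hz, if_neg (fun h => hz (hne.mpr h)), key]
  · rw [if_neg hc, if_neg (show ¬ 8 * sm.toList.length >
        ct.toList.countP (fun c => PySem.Chars.isalpha c) by rw [← hbl, ← hlen]; exact hc)]
    rw [key]
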